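-- pv_equiv track=rewrite | github.com/root-able/pisensor | commons.py | get_byid_split
-- ===== SOURCE A (Python) =====
-- def get_byid_stripped(
--     input_list: list,
--     entry_id: int,
--     def_str: str = str(),
-- ) -> str:
--     """Safely return a string from a list using its id"""
--
--     if len(input_list) > entry_id:
--         return input_list[entry_id].strip()
--
--     else:
--         return def_str
--
-- def get_byid_split(
--     input_string: str,
--     string_separator: str,
--     default_value: str,
--     items_count: int,
-- ) -> list:
--     """Get multiple items from an input string"""
--
--     # Initialize lists
--     split_values = tuple()
--     split_items = input_string.split(string_separator)
--
--     # Iterate over all split items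
--     for item_id in range(0, items_count):
--
--         item_value = get_byid_stripped(
--             input_list=split_items,
--             entry_id=item_id,
--             def_str=default_value,
--         )
--         split_values += (item_value,)
--
--     return split_values
-- ===== SOURCE B (Python) =====
-- def get_byid_split(
--     input_string: str,
--     string_separator: str,
--     default_value: str,
--     items_count: int,
-- ) -> list:
--     """Get multiple items from an input string"""
--     n = max(0, items_count)
--     present = [s.strip() for s in input_string.split(string_separator)[:n]]
--     return tuple(present + [default_value] * (n - len(present)))
-- ===== Notes on version B (the rewrite author's own statement) =====
-- stated objective: simpler
-- what changed: Replaces the range-indexed loop with its per-index present/default branch (via the get_byid_stripped helper) by a slice-map over the actually present items followed by a bulk pad of defaults.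
import Mathlib
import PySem

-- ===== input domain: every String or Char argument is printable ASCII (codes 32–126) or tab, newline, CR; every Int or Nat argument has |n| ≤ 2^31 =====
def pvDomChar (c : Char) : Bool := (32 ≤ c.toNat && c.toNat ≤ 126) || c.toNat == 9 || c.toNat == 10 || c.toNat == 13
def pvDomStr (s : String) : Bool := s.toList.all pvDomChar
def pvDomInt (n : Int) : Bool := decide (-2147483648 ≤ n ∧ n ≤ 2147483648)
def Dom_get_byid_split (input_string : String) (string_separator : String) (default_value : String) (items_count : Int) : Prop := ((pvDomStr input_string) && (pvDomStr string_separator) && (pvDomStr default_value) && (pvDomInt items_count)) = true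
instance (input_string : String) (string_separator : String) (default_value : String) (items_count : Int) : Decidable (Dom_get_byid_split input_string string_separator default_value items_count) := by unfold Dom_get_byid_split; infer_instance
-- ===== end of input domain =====

-- B replaces A's range-indexed loop (present/default branch per index) by a slice-map over the
-- present items plus a bulk pad of defaults; objective: simpler.

-- ===== PORT A =====
-- helper get_byid_stripped; the index is only reached under the length guard with a nonnegative
-- id, where pyGetD is exact (the default is never used there)
def get_byid_stripped (input_list : List String) (entry_id : Int) (def_str : String) : String :=
  if PySem.List.len input_list > entry_id then
    PySem.Str.strip (PySem.List.pyGetD input_list entry_id def_str)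
  else
    def_str

def get_byid_split (input_string : String) (string_separator : String) (default_value : String) (items_count : Int) : List String :=
  match PySem.Str.split? input_string string_separator with
  | none => []  -- Python raises ValueError here (empty separator); excluded by Pre_
  | some split_items =>
    (PySem.List.pyRange 0 items_count 1).foldl
      (fun split_values item_id =>
        split_values ++ [get_byid_stripped split_items item_id default_value]) []

-- ===== PORT B =====
def get_byid_split_alt (input_string : String) (string_separator : String) (default_value : String) (items_count : Int) : List String :=
  match PySem.Str.split? input_string string_separator with
  | none => []  -- Python raises ValueError here (empty separator); excluded by Pre_
  | some items =>
    let n : Int := max 0 items_count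
    -- items[:n] with n ≥ 0 is exactly take
    let present := (items.take n.toNat).map PySem.Str.strip
    present ++ List.replicate (n - present.length).toNat default_value

-- ===== PRECONDITION & SPEC =====
-- Pre_ excludes only string_separator = "", on which Python's str.split raises ValueError.
def Pre_get_byid_split (input_string : String) (string_separator : String) (default_value : String) (items_count : Int) : Prop :=
  string_separator ≠ ""
instance (input_string : String) (string_separator : String) (default_value : String) (items_count : Int) : Decidable (Pre_get_byid_split input_string string_separator default_value items_count) := by unfold Pre_get_byid_split; infer_instance

def pvWitness_get_byid_split : String × String × String × Int := ("a, b ,c", ",", "X", 5)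

def Spec_get_byid_split (input_string : String) (string_separator : String) (default_value : String) (items_count : Int) (out : List String) : Prop := out = get_byid_split_alt input_string string_separator default_value items_count
instance (input_string : String) (string_separator : String) (default_value : String) (items_count : Int) (out : List String) : Decidable (Spec_get_byid_split input_string string_separator default_value items_count out) := by unfold Spec_get_byid_split; infer_instance

-- ===== CLAIM (what is proved, stated in full; the proofs are below) =====
def Claim_equal_get_byid_split : Prop := ∀ (input_string : String) (string_separator : String) (default_value : String) (items_count : Int), Dom_get_byid_split input_string string_separator default_value items_count → Pre_get_byid_split input_string string_separator default_value items_count → Spec_get_byid_split input_string string_separator default_value items_count (get_byid_split input_string string_separator default_value items_count)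

-- ===== LEMMAS AND PROOFS =====

-- the index-by-index picture of A equals B's slice-map-plus-pad picture
lemma key_map_range (d : String) : ∀ (m : Nat) (items : List String),
    (List.range m).map (fun (k : Nat) => if k < items.length then PySem.Str.strip (items.getD k d) else d)
      = (items.take m).map PySem.Str.strip ++ List.replicate (m - items.length) d := by
  intro m
  induction m with
  | zero => intro items; simp
  | succ m ih =>
    intro items
    cases items with
    | nil => simp [List.map_const']
    | cons x xs =>
      rw [List.range_succ_eq_map]
      simp only [List.map_cons, List.map_map]
      rw [if_pos (by simp : (0 : Nat) < (x :: xs).length)]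
      have hcong : ((List.range m).map ((fun (k : Nat) => if k < (x :: xs).length then PySem.Str.strip ((x :: xs).getD k d) else d) ∘ Nat.succ))
          = (List.range m).map (fun (k : Nat) => if k < xs.length then PySem.Str.strip (xs.getD k d) else d) := by
        apply List.map_congr_left
        intro k _
        simp only [Function.comp_apply, List.length_cons, Nat.succ_lt_succ_iff]
        by_cases h : k < xs.length <;> simp [h]
      rw [hcong, ih xs]
      simp [List.take_succ_cons]

-- ===== VERDICT (by name: the statement is the Claim_ definition above) =====
theorem get_byid_split_spec : Claim_equal_get_byid_split := by
  intro input_string string_separator default_value items_count _ _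
  unfold Spec_get_byid_split get_byid_split get_byid_split_alt
  cases hs : PySem.Str.split? input_string string_separator with
  | none => rfl
  | some items =>
    dsimp only
    rw [PySem.List.foldl_append_singleton_eq_map, PySem.List.pyRange_one, List.map_map]
    have hm : (max 0 items_count).toNat = (items_count - 0).toNat := by omega
    have hmax : (max 0 items_count) = (((items_count - 0).toNat : Nat) : Int) := by omega
    set m : Nat := (items_count - 0).toNat with hmdef
    have hfun : (List.range m).map ((fun item_id => get_byid_stripped items item_id default_value) ∘ (fun (k : Nat) => (0 : Int) + (k : Int)))
        = (List.range m).map (fun (k : Nat) => if k < items.length then PySem.Str.strip (items.getD k default_value) else default_value) := by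
      apply List.map_congr_left
      intro k _
      simp only [Function.comp_apply]
      unfold get_byid_stripped
      rw [show ((0 : Int) + (k : Int)) = ((k : Nat) : Int) by omega]
      by_cases h : k < items.length
      · rw [if_pos (by rw [PySem.List.len_eq]; exact_mod_cast h), if_pos h, PySem.List.pyGetD_natCast]
      · rw [if_neg (by rw [PySem.List.len_eq]; intro hc; exact h (by exact_mod_cast hc)), if_neg h]
    rw [List.nil_append, hfun, key_map_range, hm, hmax]
    congr 1
    rw [List.length_map, List.length_take]
    congr 1
    omega
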